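-- pv_equiv track=rewrite | github.com/amin942001/AMFTravellingWave | amftrack/pipeline/functions/image_processing/node_id.py | recursive_mapping
-- ===== SOURCE A (Python) =====
-- def recursive_mapping(corresp_list, t, node):
--     if t == 0:
--         return f"{t}_{node}"
--     else:
--         corresp = corresp_list[t - 1]
--         if node not in corresp.keys():
--             return f"{t}_{node}"
--         else:
--             return recursive_mapping(corresp_list, t - 1, corresp[node])
-- ===== SOURCE B (Python) =====
-- def recursive_mapping(corresp_list, t, node):
--     while t != 0:
--         corresp = corresp_list[t - 1]
--         if node not in corresp:
--             return f"{t}_{node}"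
--         node = corresp[node]
--         t -= 1
--     return f"{t}_{node}"
-- ===== Notes on version B (the rewrite author's own statement) =====
-- stated objective: simpler
-- what changed: Replaces the tail recursion by an iterative while-loop that threads (t, node) as mutable state, returning the sentinel string on a missing key and decrementing t otherwise.
-- outside the precondition, e.g. on recursive_mapping([{9: 9}, {}], -1, 5): A returns '-1_5', B returns '-1_5'; on recursive_mapping([], 1, 0): A raises IndexError, B raises IndexError
import Mathlib
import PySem

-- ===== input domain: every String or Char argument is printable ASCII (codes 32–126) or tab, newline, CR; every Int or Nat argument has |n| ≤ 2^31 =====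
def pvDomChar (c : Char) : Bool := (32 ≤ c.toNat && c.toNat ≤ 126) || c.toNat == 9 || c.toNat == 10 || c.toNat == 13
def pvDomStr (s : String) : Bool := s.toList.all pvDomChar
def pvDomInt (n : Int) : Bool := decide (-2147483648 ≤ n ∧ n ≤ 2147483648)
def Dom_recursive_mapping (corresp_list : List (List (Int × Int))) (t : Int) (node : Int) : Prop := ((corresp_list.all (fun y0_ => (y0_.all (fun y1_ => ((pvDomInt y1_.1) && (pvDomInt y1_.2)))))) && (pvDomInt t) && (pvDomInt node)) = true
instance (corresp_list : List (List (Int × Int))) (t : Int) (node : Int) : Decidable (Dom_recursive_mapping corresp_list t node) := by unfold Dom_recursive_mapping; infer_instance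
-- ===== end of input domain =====

-- B rewrites A's tail recursion as an iterative loop over the same (t, node) state (objective: simpler).

-- ===== PORT A =====
-- A's recursion decreases t by 1 each step; under Pre_ (0 ≤ t) it is structural recursion on t.toNat.
-- The 'none' case of pyGet? (IndexError in Python) is unreachable under Pre_ and returns "" only to make the port total.
def recursive_mapping_go (corresp_list : List (List (Int × Int))) : Nat → Int → String
  | 0, node => "0_" ++ PySem.Int.toStr node
  | n+1, node =>
    match PySem.List.pyGet? corresp_list (((n : Int) + 1) - 1) with
    | none => ""
    | some corresp =>
      match List.lookup node corresp with
      | none => PySem.Int.toStr ((n : Int) + 1) ++ "_" ++ PySem.Int.toStr node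
      | some v => recursive_mapping_go corresp_list n v

def recursive_mapping (corresp_list : List (List (Int × Int))) (t : Int) (node : Int) : String :=
  recursive_mapping_go corresp_list t.toNat node

-- ===== PORT B =====
-- B's while-loop: one fold step per loop iteration; Sum.inl = the loop has returned, Sum.inr = current node.
def rmStep (corresp_list : List (List (Int × Int))) (st : Sum String Int) (tt : Int) : Sum String Int :=
  match st with
  | .inl s => .inl s
  | .inr node =>
    match PySem.List.pyGet? corresp_list (tt - 1) with
    | none => .inl ""   -- IndexError, unreachable under Pre_
    | some corresp =>
      match List.lookup node corresp with
      | none => .inl (PySem.Int.toStr tt ++ "_" ++ PySem.Int.toStr node)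
      | some v => .inr v

def recursive_mapping_alt (corresp_list : List (List (Int × Int))) (t : Int) (node : Int) : String :=
  match (PySem.List.pyRange t 0 (-1)).foldl (rmStep corresp_list) (Sum.inr node) with
  | .inl s => s
  | .inr nd => "0_" ++ PySem.Int.toStr nd   -- after the loop t = 0

-- ===== PRECONDITION & SPEC =====
-- Pre_ restricts t to the natural time domain 0 ≤ t ≤ len(corresp_list): for t > len (and t < 0 with a
-- short list) A raises IndexError, and for other negative t any value A returns reaches data only through
-- Python's negative-index wraparound, outside the intended time-index domain.
def Pre_recursive_mapping (corresp_list : List (List (Int × Int))) (t : Int) (node : Int) : Prop :=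
  0 ≤ t ∧ t ≤ corresp_list.length
instance (corresp_list : List (List (Int × Int))) (t : Int) (node : Int) : Decidable (Pre_recursive_mapping corresp_list t node) := by unfold Pre_recursive_mapping; infer_instance

def pvWitness_recursive_mapping : (List (List (Int × Int))) × Int × Int := ([[(1, 2)], [(3, 1)]], 2, 3)

def Spec_recursive_mapping (corresp_list : List (List (Int × Int))) (t : Int) (node : Int) (out : String) : Prop := out = recursive_mapping_alt corresp_list t node
instance (corresp_list : List (List (Int × Int))) (t : Int) (node : Int) (out : String) : Decidable (Spec_recursive_mapping corresp_list t node out) := by unfold Spec_recursive_mapping; infer_instance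

-- ===== CLAIM (what is proved, stated in full; the proofs are below) =====
def Claim_equal_recursive_mapping : Prop := ∀ (corresp_list : List (List (Int × Int))) (t : Int) (node : Int), Dom_recursive_mapping corresp_list t node → Pre_recursive_mapping corresp_list t node → Spec_recursive_mapping corresp_list t node (recursive_mapping corresp_list t node)

-- ===== LEMMAS AND PROOFS =====

theorem rm_foldl_inl (cl : List (List (Int × Int))) (s : String) (l : List Int) :
    l.foldl (rmStep cl) (Sum.inl s) = Sum.inl s := by
  induction l with
  | nil => rfl
  | cons x xs ih => simpa [rmStep] using ih

theorem rm_go_eq_fold (cl : List (List (Int × Int))) (n : Nat) (node : Int)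
    (h : (n : Int) ≤ cl.length) :
    recursive_mapping_go cl n node = recursive_mapping_alt cl (n : Int) node := by
  induction n generalizing node with
  | zero =>
    simp [recursive_mapping_go, recursive_mapping_alt,
      PySem.List.pyRange_neg_one_eq_nil (by norm_num : (0:Int) ≤ 0)]
  | succ n ih =>
    have hcons : PySem.List.pyRange ((n : Int) + 1) 0 (-1)
        = ((n : Int) + 1) :: PySem.List.pyRange ((n : Int) + 1 - 1) 0 (-1) :=
      PySem.List.pyRange_neg_one_cons (by positivity)
    have hn : ((n : Int) + 1) - 1 = (n : Int) := by ring
    unfold recursive_mapping_go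
    unfold recursive_mapping_alt
    push_cast
    rw [hcons, hn]
    simp only [List.foldl_cons]
    cases hg : cl[n]? with
    | none =>
      simp [rmStep, hn, hg, rm_foldl_inl]
    | some corresp =>
      cases hl : List.lookup node corresp with
      | none => simp [rmStep, hn, hg, hl, rm_foldl_inl]
      | some v =>
        have := ih v (le_trans (by exact_mod_cast Nat.le_succ n) h)
        unfold recursive_mapping_alt at this
        simpa [rmStep, hn, hg, hl] using this

-- ===== VERDICT (by name: the statement is the Claim_ definition above) =====
theorem recursive_mapping_spec : Claim_equal_recursive_mapping := by
  intro cl t node _ hpre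
  unfold Spec_recursive_mapping recursive_mapping
  have ht : ((t.toNat : Int)) = t := Int.toNat_of_nonneg hpre.1
  have := rm_go_eq_fold cl t.toNat node (by rw [ht]; exact hpre.2)
  rw [this, ht]
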